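-- pv_equiv track=rewrite | github.com/knox-ber/Problema-8-damas | Damas.py | convert_to_fen_row
-- ===== SOURCE A (Python) =====
-- def convert_to_fen_row(row: str) -> str:
--     fen_row = ""
--     empty_count = 0
--     for char in row:
--         if char == '.':
--             empty_count += 1  # Contamos las casillas vacías
--         else:
--             if empty_count > 0:
--                 fen_row += str(empty_count)  # Escribimos el número de casillas vacías
--                 empty_count = 0  # Reseteamos el contador
--             fen_row += char  # Añadimos la pieza
--     if empty_count > 0:  # Si terminamos la fila con vacíos, los añadimos
--         fen_row += str(empty_count)
--     return fen_row
-- ===== SOURCE B (Python) =====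
-- def convert_to_fen_row(row: str) -> str:
--     # Run-length scan: extract each maximal run up front, emit its count
--     # (for '.') or the run verbatim, then join once.
--     parts = []
--     i = 0
--     n = len(row)
--     while i < n:
--         j = i
--         while j < n and row[j] == row[i]:
--             j += 1
--         parts.append(str(j - i) if row[i] == '.' else row[i:j])
--         i = j
--     return ''.join(parts)
-- ===== Notes on version B (the rewrite author's own statement) =====
-- stated objective: alternative
-- what changed: Replaces the char-by-char loop with an empty_count accumulator and flush-on-piece/flush-at-end by a two-index run extraction: each maximal run of identical characters is located up front and emitted as a count (dots) or a slice (pieces), joined once at the end.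
import Mathlib
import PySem

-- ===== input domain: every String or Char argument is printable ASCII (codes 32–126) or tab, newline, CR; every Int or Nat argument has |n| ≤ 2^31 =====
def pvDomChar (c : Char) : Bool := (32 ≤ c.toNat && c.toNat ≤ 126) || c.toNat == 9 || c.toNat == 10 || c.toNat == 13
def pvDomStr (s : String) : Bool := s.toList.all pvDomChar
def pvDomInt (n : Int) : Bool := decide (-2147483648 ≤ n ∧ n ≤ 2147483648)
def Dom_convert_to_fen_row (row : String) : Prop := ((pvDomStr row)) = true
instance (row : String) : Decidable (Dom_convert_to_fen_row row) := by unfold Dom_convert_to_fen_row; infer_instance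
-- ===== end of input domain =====

-- B replaces A's empty_count accumulator with up-front maximal-run extraction; alternative structure, same cost.

-- ===== PORT A =====
-- A's for-loop over the row with state (fen_row, empty_count), flush-on-piece and flush-at-end.
def pvALoop : List Char → List Char → Int → List Char
  | [], fen, c => if c > 0 then fen ++ (PySem.Int.toStr c).toList else fen
  | ch :: rest, fen, c =>
    if ch = '.' then pvALoop rest fen (c + 1)
    else pvALoop rest ((if c > 0 then fen ++ (PySem.Int.toStr c).toList else fen) ++ [ch]) 0

def convert_to_fen_row (row : String) : String := String.ofList (pvALoop row.toList [] 0)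

-- ===== PORT B =====
-- B's outer loop: take the maximal run at the front, emit count (dots) or the run, recurse on the rest.
def pvRunsFen : List Char → List Char
  | [] => []
  | c :: rest =>
    (if c = '.' then (PySem.Int.toStr ((rest.takeWhile (· == c)).length + 1)).toList
     else c :: rest.takeWhile (· == c)) ++ pvRunsFen (rest.dropWhile (· == c))
termination_by l => l.length
decreasing_by
  simp only [List.length_cons]
  exact Nat.lt_succ_of_le (List.length_dropWhile_le _ _)

def convert_to_fen_row_alt (row : String) : String := String.ofList (pvRunsFen row.toList)

-- ===== PRECONDITION & SPEC =====
def Spec_convert_to_fen_row (row : String) (out : String) : Prop := out = convert_to_fen_row_alt row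
instance (row : String) (out : String) : Decidable (Spec_convert_to_fen_row row out) := by unfold Spec_convert_to_fen_row; infer_instance

-- ===== CLAIM (what is proved, stated in full; the proofs are below) =====
def Claim_equal_convert_to_fen_row : Prop := ∀ (row : String), Dom_convert_to_fen_row row → Spec_convert_to_fen_row row (convert_to_fen_row row)

-- ===== LEMMAS AND PROOFS =====

lemma pvRunsFen_nil : pvRunsFen [] = [] := by rw [pvRunsFen]

lemma pvRunsFen_cons (c : Char) (rest : List Char) : pvRunsFen (c :: rest) =
    (if c = '.' then (PySem.Int.toStr ((rest.takeWhile (· == c)).length + 1)).toList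
     else c :: rest.takeWhile (· == c)) ++ pvRunsFen (rest.dropWhile (· == c)) := by
  rw [pvRunsFen]

-- For a non-dot char, pvRunsFen also emits a run of it literally, char by char.
lemma pvRunsFen_piece_run (l : List Char) (ch : Char) (h : ch ≠ '.') :
    pvRunsFen l = l.takeWhile (· == ch) ++ pvRunsFen (l.dropWhile (· == ch)) := by
  cases l with
  | nil => simp [pvRunsFen_nil]
  | cons d l' =>
    by_cases hd : d = ch
    · subst hd
      rw [pvRunsFen_cons]
      simp [h]
    · simp [hd]

lemma pvALoop_cons (ch : Char) (rest fen : List Char) (c : Int) :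
    pvALoop (ch :: rest) fen c =
    (if ch = '.' then pvALoop rest fen (c + 1)
     else pvALoop rest ((if c > 0 then fen ++ (PySem.Int.toStr c).toList else fen) ++ [ch]) 0) := rfl

-- Joint invariant for A's loop: mid-dot-run with pending count c > 0, and clean state c = 0.
lemma pvALoop_spec (n : ℕ) : ∀ l : List Char, l.length ≤ n →
    (∀ fen (c : Int), 0 < c →
      pvALoop l fen c =
        fen ++ (PySem.Int.toStr (c + (l.takeWhile (· == '.')).length)).toList
            ++ pvRunsFen (l.dropWhile (· == '.'))) ∧
    (∀ fen, pvALoop l fen 0 = fen ++ pvRunsFen l) := by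
  induction n with
  | zero =>
    intro l hl
    have : l = [] := List.eq_nil_of_length_eq_zero (Nat.le_zero.mp hl)
    subst this
    constructor
    · intro fen c hc
      simp [pvALoop, pvRunsFen_nil, hc]
    · intro fen
      simp [pvALoop, pvRunsFen_nil]
  | succ n ih =>
    intro l hl
    cases l with
    | nil =>
      constructor
      · intro fen c hc; simp [pvALoop, pvRunsFen_nil, hc]
      · intro fen; simp [pvALoop, pvRunsFen_nil]
    | cons ch rest =>
      have hrest : rest.length ≤ n := Nat.le_of_succ_le_succ hl
      constructor
      · intro fen c hc
        by_cases hdot : ch = '.'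
        · subst hdot
          rw [pvALoop_cons, if_pos rfl, (ih rest hrest).1 fen (c + 1) (by omega)]
          simp only [List.takeWhile_cons, List.dropWhile_cons, BEq.rfl, if_true,
            List.length_cons]
          have harg : c + 1 + ((rest.takeWhile (· == '.')).length : Int)
              = c + (((rest.takeWhile (· == '.')).length : ℕ) + 1 : ℕ) := by push_cast; ring
          rw [harg]
        · have hb : (ch == '.') = false := by simp [hdot]
          rw [pvALoop_cons, if_neg hdot, if_pos hc, (ih rest hrest).2]
          simp only [List.takeWhile_cons, List.dropWhile_cons, hb, if_false,
            Bool.false_eq_true]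
          rw [pvRunsFen_cons, if_neg hdot, pvRunsFen_piece_run rest ch hdot]
          simp
      · intro fen
        by_cases hdot : ch = '.'
        · subst hdot
          rw [pvALoop_cons, if_pos rfl, (ih rest hrest).1 fen (0 + 1) (by omega),
            pvRunsFen_cons, if_pos rfl]
          have harg : (0 : Int) + 1 + ((rest.takeWhile (· == '.')).length : Int)
              = (((rest.takeWhile (· == '.')).length : ℕ) + 1 : ℕ) := by push_cast; ring
          rw [harg]
          simp
        · rw [pvALoop_cons, if_neg hdot, if_neg (by omega), (ih rest hrest).2,
            pvRunsFen_cons, if_neg hdot, pvRunsFen_piece_run rest ch hdot]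
          simp

-- ===== VERDICT (by name: the statement is the Claim_ definition above) =====
theorem convert_to_fen_row_spec : Claim_equal_convert_to_fen_row := by
  intro row _
  unfold Spec_convert_to_fen_row convert_to_fen_row convert_to_fen_row_alt
  rw [(pvALoop_spec row.toList.length row.toList (le_refl _)).2]
  simp
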